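-- pv_equiv track=rewrite | github.com/V1B3hR/agentnet | agentnet/plugins/security.py | _is_import_blocked
-- ===== SOURCE A (Python) =====
-- from typing import Dict, List, Any, Optional, Set
--
-- def _is_import_blocked(module_name: str, allowed: Set[str], blocked: Set[str]) -> bool:
--     """Check if an import is blocked by security policy."""
--     # Check explicit blocks
--     if module_name in blocked:
--         return True
--
--     # Check if module starts with blocked prefix
--     for blocked_prefix in blocked:
--         if module_name.startswith(blocked_prefix + "."):
--             return True
--
--     # If allowlist is defined, check if module is allowed
--     if allowed:
--         if module_name not in allowed:
--             # Check if module starts with allowed prefix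
--             allowed_prefixes = [prefix for prefix in allowed if module_name.startswith(prefix + ".")]
--             if not allowed_prefixes:
--                 return True
--
--     return False
-- ===== SOURCE B (Python) =====
-- def _is_import_blocked(module_name, allowed, blocked):
--     """Check if an import is blocked by security policy."""
--     # Gather the module name and every dotted ancestor prefix in one pass.
--     candidates = [module_name]
--     for i, ch in enumerate(module_name):
--         if ch == '.':
--             candidates.append(module_name[:i])
--     if any(c in blocked for c in candidates):
--         return True
--     if allowed and not any(c in allowed for c in candidates):
--         return True
--     return False
-- ===== Notes on version B (the rewrite author's own statement) =====
-- stated objective: faster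
-- what changed: Instead of scanning the blocked and allowed sets testing startswith for each prefix, B generates the dotted ancestor prefixes of module_name once and tests set membership for each, removing the dependence on the set sizes.
import Mathlib
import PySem

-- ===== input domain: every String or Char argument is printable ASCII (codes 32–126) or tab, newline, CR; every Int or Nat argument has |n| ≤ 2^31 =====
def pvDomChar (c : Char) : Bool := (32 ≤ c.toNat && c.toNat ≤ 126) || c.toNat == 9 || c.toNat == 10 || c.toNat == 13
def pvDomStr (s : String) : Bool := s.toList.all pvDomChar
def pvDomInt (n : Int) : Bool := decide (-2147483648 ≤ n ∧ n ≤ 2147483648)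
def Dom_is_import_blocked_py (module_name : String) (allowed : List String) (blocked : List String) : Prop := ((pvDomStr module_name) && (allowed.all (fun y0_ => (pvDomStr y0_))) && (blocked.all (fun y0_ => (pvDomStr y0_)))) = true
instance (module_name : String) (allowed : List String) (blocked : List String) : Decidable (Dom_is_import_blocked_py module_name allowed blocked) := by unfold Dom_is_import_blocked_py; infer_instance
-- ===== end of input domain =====

-- B replaces A's scan of the blocked/allowed sets (a startswith test per element) by generating
-- the dotted ancestor prefixes of module_name once and testing membership for each of them.


-- ===== PORT A =====
-- literal transliteration of A: explicit-membership check, then a scan of `blocked` testing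
-- startswith(prefix + "."), then the allowlist branch with its filtered `allowed_prefixes` list.
-- (string equality / startswith are computed on .toList, which is Python-exact)
def is_import_blocked_py (module_name : String) (allowed : List String) (blocked : List String) : Bool :=
  if blocked.any (fun b => b.toList == module_name.toList) then true
  else if blocked.any (fun p => PySem.Chars.startswith module_name.toList (p.toList ++ ['.'])) then true
  else if !allowed.isEmpty then
    if !(allowed.any (fun a => a.toList == module_name.toList)) then
      let allowed_prefixes := allowed.filter (fun p => PySem.Chars.startswith module_name.toList (p.toList ++ ['.']))
      if allowed_prefixes.isEmpty then true else false
    else false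
  else false

-- ===== PORT B =====
-- literal transliteration of B: build [module_name] plus module_name[:i] for each dot position i
-- (the enumerate loop, appending as in Source B), then two membership passes over the candidates.
def is_import_blocked_py_alt (module_name : String) (allowed : List String) (blocked : List String) : Bool :=
  let M := module_name.toList
  let candidates : List (List Char) :=
    (PySem.List.enumerate M).foldl
      (fun acc ic => if ic.2 == '.' then acc ++ [M.take ic.1.toNat] else acc) [M]
  if candidates.any (fun c => blocked.any (fun b => b.toList == c)) then true
  else if !allowed.isEmpty && !(candidates.any (fun c => allowed.any (fun a => a.toList == c))) then true
  else false

-- ===== PRECONDITION & SPEC =====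
def Spec_is_import_blocked_py (module_name : String) (allowed : List String) (blocked : List String) (out : Bool) : Prop := out = is_import_blocked_py_alt module_name allowed blocked
instance (module_name : String) (allowed : List String) (blocked : List String) (out : Bool) : Decidable (Spec_is_import_blocked_py module_name allowed blocked out) := by unfold Spec_is_import_blocked_py; infer_instance

-- ===== CLAIM (what is proved, stated in full; the proofs are below) =====
def Claim_equal_is_import_blocked_py : Prop := ∀ (module_name : String) (allowed : List String) (blocked : List String), Dom_is_import_blocked_py module_name allowed blocked → Spec_is_import_blocked_py module_name allowed blocked (is_import_blocked_py module_name allowed blocked)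

-- ===== LEMMAS AND PROOFS =====

-- the dotted ancestor prefixes of M, as B's loop produces them
def dotPref (M : List Char) : List (List Char) :=
  ((PySem.List.enumerate M).filter (fun ic => ic.2 == '.')).map (fun ic => M.take ic.1.toNat)

lemma mem_enumerate {α : Type} (M : List α) (s : Int) (i : Int) (c : α) :
    (i, c) ∈ PySem.List.enumerate M s ↔ ∃ k : Nat, i = s + k ∧ M[k]? = some c := by
  induction M generalizing s with
  | nil => simp [PySem.List.enumerate]
  | cons x xs ih =>
    rw [PySem.List.enumerate_cons]
    simp only [List.mem_cons, ih, Prod.mk.injEq]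
    constructor
    · rintro (⟨rfl, rfl⟩ | ⟨k, rfl, hk⟩)
      · exact ⟨0, by simp⟩
      · refine ⟨k + 1, ?_, ?_⟩
        · push_cast; ring_nf
        · simpa using hk
    · rintro ⟨k, rfl, hk⟩
      cases k with
      | zero =>
        simp only [List.getElem?_cons_zero, Option.some.injEq] at hk
        left
        exact ⟨by push_cast; ring, hk.symm⟩
      | succ k => right; exact ⟨k, by push_cast; ring, by simpa using hk⟩

lemma mem_dotPref (M l : List Char) :
    l ∈ dotPref M ↔ (l ++ ['.']) <+: M := by
  unfold dotPref
  simp only [List.mem_map, List.mem_filter, beq_iff_eq, Prod.exists]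
  constructor
  · rintro ⟨i, c, ⟨hm, rfl⟩, rfl⟩
    rw [mem_enumerate] at hm
    obtain ⟨k, rfl, hk⟩ := hm
    have hlt : k < M.length := (List.getElem?_eq_some_iff.mp hk).1
    have hget : M[k] = '.' := (List.getElem?_eq_some_iff.mp hk).2
    refine ⟨M.drop (k + 1), ?_⟩
    conv_rhs => rw [← List.take_append_drop k M]
    rw [List.drop_eq_getElem_cons hlt, hget]
    simp
  · rintro ⟨t, rfl⟩
    refine ⟨l.length, '.', ⟨?_, ?_⟩, ?_⟩
    · rw [mem_enumerate]
      exact ⟨l.length, by simp, by simp⟩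
    · rfl
    · simp

lemma isEmpty_filter {α : Type} (p : α → Bool) (l : List α) :
    (l.filter p).isEmpty = !l.any p := by
  rw [Bool.eq_iff_iff]
  simp [List.isEmpty_iff, List.filter_eq_nil_iff]

-- B's candidate list is M followed by the dotted prefixes
lemma candidates_eq (M : List Char) :
    (PySem.List.enumerate M).foldl
      (fun acc ic => if ic.2 == '.' then acc ++ [M.take ic.1.toNat] else acc) [M]
    = M :: dotPref M := by
  have h := PySem.List.foldl_append_if (fun ic : Int × Char => ic.2 == '.')
      (fun ic : Int × Char => M.take ic.1.toNat) (PySem.List.enumerate M) [M]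
  simpa [dotPref] using h

-- membership of any candidate in a string set S = exact membership of M or a startswith hit
lemma cand_any (M : List Char) (S : List String) :
    ((M :: dotPref M).any (fun c => S.any (fun s => s.toList == c)))
    = (S.any (fun s => s.toList == M) ||
       S.any (fun p => PySem.Chars.startswith M (p.toList ++ ['.']))) := by
  rw [List.any_cons]
  congr 1
  rw [Bool.eq_iff_iff]
  simp only [List.any_eq_true, beq_iff_eq, PySem.Chars.startswith_iff]
  constructor
  · rintro ⟨c, hc, s, hs, rfl⟩
    exact ⟨s, hs, (mem_dotPref M _).mp hc⟩
  · rintro ⟨s, hs, h⟩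
    exact ⟨s.toList, (mem_dotPref M _).mpr h, s, hs, rfl⟩

-- ===== VERDICT (by name: the statement is the Claim_ definition above) =====
theorem is_import_blocked_py_spec : Claim_equal_is_import_blocked_py := by
  intro m al bl _
  unfold Spec_is_import_blocked_py is_import_blocked_py is_import_blocked_py_alt
  simp only [candidates_eq, cand_any, isEmpty_filter]
  cases h1 : bl.any (fun b => b.toList == m.toList) <;>
  cases h2 : bl.any (fun p => PySem.Chars.startswith m.toList (p.toList ++ ['.'])) <;>
  cases h3 : al.isEmpty <;>
  cases h4 : al.any (fun a => a.toList == m.toList) <;>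
  cases h5 : al.any (fun p => PySem.Chars.startswith m.toList (p.toList ++ ['.'])) <;>
    simp
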